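-- pv_equiv track=rewrite | github.com/pypi-data/pypi-mirror-36 | packages/pyramid-selectauth/pyramid_selectauth-0.0.2-py2.py3-none-any.whl/pyramid_selectauth/__init__.py | get_policy_definitions
-- ===== SOURCE A (Python) =====
-- def get_policy_definitions(settings):
--     """Find all selectauth policy definitions from the settings dict.
--
--     This function processes the paster deployment settings looking for items
--     that start with "selectauth.policy.<policyname>.".  It pulls them all out
--     into a dict indexed by the policy name.
--     """
--     policy_definitions = {}
--     for name in settings:
--         if not name.startswith("selectauth.policy."):
--             continue
--         value = settings[name]
--         name = name[len("selectauth.policy."):]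
--         policy_name, setting_name = name.split(".", 1)
--         if policy_name not in policy_definitions:
--             policy_definitions[policy_name] = {}
--         policy_definitions[policy_name][setting_name] = value
--     return policy_definitions
-- ===== SOURCE B (Python) =====
-- def get_policy_definitions(settings):
--     """Find all selectauth policy definitions from the settings dict.
--
--     Alternative decomposition: first collect the parsed (policy, setting, value)
--     triples in one pass, then compute the distinct policy names in order of first
--     appearance, and build each policy's inner dict by a scan over the triples.
--     """
--     prefix = "selectauth.policy."
--     parsed = [(policy, setting, settings[name])
--               for name in settings if name.startswith(prefix)
--               for policy, setting in (name[len(prefix):].split(".", 1),)]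
--     policies = []
--     for policy, _setting, _value in parsed:
--         if policy not in policies:
--             policies.append(policy)
--     return {p: {s: v for q, s, v in parsed if q == p} for p in policies}
-- ===== Notes on version B (the rewrite author's own statement) =====
-- stated objective: alternative
-- what changed: A builds the nested dict incrementally in one pass, creating and mutating per-policy sub-dicts as it goes; B first extracts the parsed (policy, setting, value) triples, dedups the policy names in order of first appearance, and then builds each policy's inner dict by a separate scan over the triples.
import Mathlib
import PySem

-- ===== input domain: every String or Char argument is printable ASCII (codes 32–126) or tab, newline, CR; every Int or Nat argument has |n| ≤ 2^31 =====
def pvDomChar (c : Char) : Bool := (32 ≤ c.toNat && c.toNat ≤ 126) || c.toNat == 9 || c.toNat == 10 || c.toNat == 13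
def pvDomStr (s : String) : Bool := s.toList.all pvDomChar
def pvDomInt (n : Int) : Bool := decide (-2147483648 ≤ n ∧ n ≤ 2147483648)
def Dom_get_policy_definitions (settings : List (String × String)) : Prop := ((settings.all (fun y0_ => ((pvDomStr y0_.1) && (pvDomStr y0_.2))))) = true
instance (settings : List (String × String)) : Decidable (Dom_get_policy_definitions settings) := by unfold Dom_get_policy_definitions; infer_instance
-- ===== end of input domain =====

-- B re-decomposes A's single incremental pass into: parse triples, dedup policy names, then one scan per policy (objective: alternative, same results).

-- ===== PORT A =====
-- A's loop body (one iteration of `for name in settings:`); value = settings[name] is the dict lookup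
def get_policy_definitions_body (settings : List (String × String))
    (pd : PySem.Dict String (PySem.Dict String String)) (nv : String × String) :
    PySem.Dict String (PySem.Dict String String) :=
  if PySem.Str.startswith nv.1 "selectauth.policy." then
    let value := (PySem.Dict.get? (PySem.Dict.mk settings) nv.1).getD nv.2
    let name := PySem.Str.slice nv.1 (some (PySem.Str.len "selectauth.policy.")) none
    match PySem.Str.splitMax? name "." 1 with
    | some [policy_name, setting_name] =>
      let pd := if pd.contains policy_name = false then pd.insert policy_name PySem.Dict.empty else pd
      pd.insert policy_name ((pd.getD policy_name PySem.Dict.empty).insert setting_name value)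
    | _ => pd   -- Python raises ValueError here (unpacking a 1-element split); excluded by Pre_
  else pd      -- `continue`

def get_policy_definitions (settings : List (String × String)) : List (String × List (String × String)) :=
  ((settings.foldl (get_policy_definitions_body settings) PySem.Dict.empty).items).map
    (fun q => (q.1, q.2.items))

-- ===== PORT B =====
-- one step of B's `parsed` list comprehension
def get_policy_definitions_alt_parse (settings : List (String × String))
    (acc : List (String × String × String)) (nv : String × String) :
    List (String × String × String) :=
  if PySem.Str.startswith nv.1 "selectauth.policy." then
    match PySem.Str.splitMax? (PySem.Str.slice nv.1 (some (PySem.Str.len "selectauth.policy.")) none) "." 1 with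
    | some [policy, setting] => acc ++ [(policy, setting, (PySem.Dict.get? (PySem.Dict.mk settings) nv.1).getD nv.2)]
    | _ => acc   -- Python raises ValueError here; excluded by Pre_
  else acc

def get_policy_definitions_alt (settings : List (String × String)) : List (String × List (String × String)) :=
  let parsed : List (String × String × String) :=
    settings.foldl (get_policy_definitions_alt_parse settings) []
  let policies : List String := parsed.foldl (fun ps t => if ps.contains t.1 then ps else ps ++ [t.1]) []
  policies.map (fun p => (p,
    (parsed.foldl (fun d t => if t.1 == p then d.insert t.2.1 t.2.2 else d)
      (PySem.Dict.empty : PySem.Dict String String)).items))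

-- ===== PRECONDITION & SPEC =====
-- Pre_ excludes exactly the settings containing a key "selectauth.policy.<rest>" where <rest> has no '.',
-- on which both Pythons raise ValueError (unpacking name.split(".", 1) into two variables).
def Pre_get_policy_definitions (settings : List (String × String)) : Prop :=
  ∀ nv ∈ settings, PySem.Str.startswith nv.1 "selectauth.policy." = true →
    PySem.Str.isIn "." (PySem.Str.slice nv.1 (some (PySem.Str.len "selectauth.policy.")) none) = true
instance (settings : List (String × String)) : Decidable (Pre_get_policy_definitions settings) := by unfold Pre_get_policy_definitions; infer_instance

def pvWitness_get_policy_definitions : (List (String × String)) :=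
  [("selectauth.policy.foo.use", "x"), ("other.setting", "1"), ("selectauth.policy.foo.level", "2"), ("selectauth.policy.bar.use", "y")]

def Spec_get_policy_definitions (settings : List (String × String)) (out : List (String × List (String × String))) : Prop := out = get_policy_definitions_alt settings
instance (settings : List (String × String)) (out : List (String × List (String × String))) : Decidable (Spec_get_policy_definitions settings out) := by unfold Spec_get_policy_definitions; infer_instance

-- ===== CLAIM (what is proved, stated in full; the proofs are below) =====
def Claim_equal_get_policy_definitions : Prop := ∀ (settings : List (String × String)), Dom_get_policy_definitions settings → Pre_get_policy_definitions settings → Spec_get_policy_definitions settings (get_policy_definitions settings)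

-- ===== LEMMAS AND PROOFS =====


-- the parsed (policy, setting, value) triples contributed by one settings item
def pvParseOne (settings : List (String × String)) (nv : String × String) : List (String × String × String) :=
  if PySem.Str.startswith nv.1 "selectauth.policy." then
    match PySem.Str.splitMax? (PySem.Str.slice nv.1 (some (PySem.Str.len "selectauth.policy.")) none) "." 1 with
    | some [p, s] => [(p, s, (PySem.Dict.get? (PySem.Dict.mk settings) nv.1).getD nv.2)]
    | _ => []
  else []

def pvParse (settings rest : List (String × String)) : List (String × String × String) :=
  match rest with
  | [] => []
  | nv :: r => pvParseOne settings nv ++ pvParse settings r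

-- A's dict update for one parsed triple
def pvStep (pd : PySem.Dict String (PySem.Dict String String)) (t : String × String × String) :
    PySem.Dict String (PySem.Dict String String) :=
  let pd := if pd.contains t.1 = false then pd.insert t.1 PySem.Dict.empty else pd
  pd.insert t.1 ((pd.getD t.1 PySem.Dict.empty).insert t.2.1 t.2.2)

set_option maxHeartbeats 1000000 in
theorem pvBodyA (settings : List (String × String)) (pd : PySem.Dict String (PySem.Dict String String))
    (nv : String × String) :
    get_policy_definitions_body settings pd nv = (pvParseOne settings nv).foldl pvStep pd := by
  unfold get_policy_definitions_body pvParseOne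
  split_ifs with hs
  · rcases hsp : PySem.Str.splitMax? (PySem.Str.slice nv.1 (some (PySem.Str.len "selectauth.policy.")) none) "." 1 with
      _ | ⟨_ | ⟨a, _ | ⟨b, _ | ⟨c, t⟩⟩⟩⟩ <;> simp only [hsp] <;> rfl
  · rfl

set_option maxHeartbeats 1000000 in
theorem pvBodyB (settings : List (String × String)) (acc : List (String × String × String))
    (nv : String × String) :
    get_policy_definitions_alt_parse settings acc nv = acc ++ pvParseOne settings nv := by
  unfold get_policy_definitions_alt_parse pvParseOne
  split_ifs with hs
  · rcases hsp : PySem.Str.splitMax? (PySem.Str.slice nv.1 (some (PySem.Str.len "selectauth.policy.")) none) "." 1 with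
      _ | ⟨_ | ⟨a, _ | ⟨b, _ | ⟨c, t⟩⟩⟩⟩ <;>
      first | rfl | exact (List.append_nil acc).symm
  · exact (List.append_nil acc).symm

theorem pvParseA (settings : List (String × String)) :
    ∀ (rest : List (String × String)) (d : PySem.Dict String (PySem.Dict String String)),
    rest.foldl (get_policy_definitions_body settings) d = (pvParse settings rest).foldl pvStep d := by
  intro rest
  induction rest with
  | nil => intro d; rfl
  | cons nv r ih =>
    intro d
    rw [List.foldl_cons, pvBodyA, pvParse, List.foldl_append, ih]

theorem pvParseB (settings : List (String × String)) :
    ∀ (rest : List (String × String)) (acc : List (String × String × String)),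
    rest.foldl (get_policy_definitions_alt_parse settings) acc = acc ++ pvParse settings rest := by
  intro rest
  induction rest with
  | nil => intro acc; exact (List.append_nil acc).symm
  | cons nv r ih =>
    intro acc
    rw [List.foldl_cons, pvBodyB, pvParse, ih, List.append_assoc]

theorem pvStep_keys (d : PySem.Dict String (PySem.Dict String String)) (t : String × String × String) :
    (pvStep d t).keys = if d.keys.contains t.1 then d.keys else d.keys ++ [t.1] := by
  unfold pvStep
  by_cases hc : d.contains t.1 = true
  · have hm : d.keys.contains t.1 = true := by
      simpa using (PySem.Dict.contains_iff_mem_keys d t.1).mp hc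
    rw [if_neg (by simp [hc]), if_pos hm]
    exact PySem.Dict.keys_insert_of_contains _ _ hc
  · have hcf : d.contains t.1 = false := by simpa using hc
    have hnm : t.1 ∉ d.keys := fun h => hc ((PySem.Dict.contains_iff_mem_keys d t.1).mpr h)
    rw [if_pos hcf, if_neg (by simpa using hnm),
        PySem.Dict.keys_insert_of_contains _ _ (PySem.Dict.contains_insert_self d t.1 PySem.Dict.empty),
        PySem.Dict.keys_insert_of_not_contains _ _ hcf]

theorem pvFold_keys :
    ∀ (ts : List (String × String × String)) (d : PySem.Dict String (PySem.Dict String String)),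
    (ts.foldl pvStep d).keys = ts.foldl (fun ps t => if ps.contains t.1 then ps else ps ++ [t.1]) d.keys := by
  intro ts
  induction ts with
  | nil => intro d; rfl
  | cons t ts ih =>
    intro d
    rw [List.foldl_cons, List.foldl_cons, ih, pvStep_keys]

theorem pvDedup_nodup :
    ∀ (ts : List (String × String × String)) (ps : List String), ps.Nodup →
    (ts.foldl (fun ps t => if ps.contains t.1 then ps else ps ++ [t.1]) ps).Nodup := by
  intro ts
  induction ts with
  | nil => intro ps h; exact h
  | cons t ts ih =>
    intro ps h
    rw [List.foldl_cons]
    by_cases hc : ps.contains t.1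
    · rw [if_pos hc]; exact ih ps h
    · rw [if_neg hc]
      refine ih _ ?_
      have hnm : t.1 ∉ ps := by simpa using hc
      refine h.append (List.nodup_singleton t.1) ?_
      intro a ha hb
      rw [List.mem_singleton] at hb
      exact hnm (hb ▸ ha)

theorem pvStep_getD (d : PySem.Dict String (PySem.Dict String String)) (t : String × String × String) (p : String) :
    (pvStep d t).getD p PySem.Dict.empty =
      if t.1 == p then (d.getD p PySem.Dict.empty).insert t.2.1 t.2.2 else d.getD p PySem.Dict.empty := by
  unfold pvStep
  by_cases hc : d.contains t.1 = false
  · rw [if_pos hc, PySem.Dict.getD_insert, PySem.Dict.getD_insert, PySem.Dict.getD_insert]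
    by_cases hp : t.1 = p
    · subst hp
      simp [PySem.Dict.getD_of_not_contains _ _ hc]
    · simp [hp, Ne.symm hp]
  · rw [if_neg hc, PySem.Dict.getD_insert]
    by_cases hp : t.1 = p
    · subst hp; simp
    · simp [hp, Ne.symm hp]

theorem pvFold_getD :
    ∀ (ts : List (String × String × String)) (d : PySem.Dict String (PySem.Dict String String)) (p : String),
    (ts.foldl pvStep d).getD p PySem.Dict.empty =
      ts.foldl (fun inner t => if t.1 == p then inner.insert t.2.1 t.2.2 else inner) (d.getD p PySem.Dict.empty) := by
  intro ts
  induction ts with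
  | nil => intro d p; rfl
  | cons t ts ih =>
    intro d p
    rw [List.foldl_cons, List.foldl_cons, ih, pvStep_getD]

-- ===== VERDICT (by name: the statement is the Claim_ definition above) =====
theorem get_policy_definitions_spec : Claim_equal_get_policy_definitions := by
  intro settings _hdom _hpre
  unfold Spec_get_policy_definitions
  simp only [get_policy_definitions, get_policy_definitions_alt]
  rw [pvParseA settings settings PySem.Dict.empty, pvParseB settings settings [], List.nil_append]
  have hkeys : ((pvParse settings settings).foldl pvStep PySem.Dict.empty).keys =
      (pvParse settings settings).foldl (fun ps t => if ps.contains t.1 then ps else ps ++ [t.1]) [] := by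
    rw [pvFold_keys, PySem.Dict.keys_empty]
  have hnodup : (((pvParse settings settings).foldl pvStep PySem.Dict.empty).keys).Nodup := by
    rw [hkeys]; exact pvDedup_nodup _ [] List.nodup_nil
  rw [PySem.Dict.items_eq_map_keys _ hnodup PySem.Dict.empty, hkeys, List.map_map]
  apply List.map_congr_left
  intro p _hp
  simp only [Function.comp_apply]
  congr 1
  rw [pvFold_getD, PySem.Dict.getD_empty]
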